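-- pv_equiv track=rewrite | github.com/MrBrantCode/unitest_baseline | mut_generate/mist_train_cf/cf_89216/solution.py | decode_caesar_cipher
-- ===== SOURCE A (Python) =====
-- def decode_caesar_cipher(sentence):
--     def decode_word(word, shift):
--         decoded_word = ""
--         for char in word:
--             if char.isalpha():
--                 ascii_offset = ord('a') if char.islower() else ord('A')
--                 decoded_char = chr((ord(char) - ascii_offset - shift) % 26 + ascii_offset)
--                 decoded_word += decoded_char
--             else:
--                 decoded_word += char
--         return decoded_word
--
--     words = sentence.split()
--     for shift in range(1, 26):
--         for i, word in enumerate(words):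
--             if decode_word(word, shift).lower() == "the":
--                 return i
--
--     return -1  # Return -1 if no match is found
-- ===== SOURCE B (Python) =====
-- def decode_caesar_cipher(sentence):
--     best = None  # (shift, index), lexicographically minimal candidate
--     for i, w in enumerate(sentence.split()):
--         if len(w) == 3 and w.isalpha():
--             s = (ord(w[0].lower()) - ord('t')) % 26
--             if (s != 0
--                     and (ord(w[1].lower()) - ord('h')) % 26 == s
--                     and (ord(w[2].lower()) - ord('e')) % 26 == s):
--                 if best is None or s < best[0]:
--                     best = (s, i)
--     return best[1] if best is not None else -1
-- ===== Notes on version B (the rewrite author's own statement) =====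
-- stated objective: faster
-- what changed: Instead of trying all 25 shifts and re-decoding every word per shift (nested loops), B makes a single pass over the words, computes for each 3-letter alphabetic word the unique shift (if any) that decodes it to 'the' by direct modular arithmetic, and keeps the lexicographically minimal (shift, index) pair.
import Mathlib
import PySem

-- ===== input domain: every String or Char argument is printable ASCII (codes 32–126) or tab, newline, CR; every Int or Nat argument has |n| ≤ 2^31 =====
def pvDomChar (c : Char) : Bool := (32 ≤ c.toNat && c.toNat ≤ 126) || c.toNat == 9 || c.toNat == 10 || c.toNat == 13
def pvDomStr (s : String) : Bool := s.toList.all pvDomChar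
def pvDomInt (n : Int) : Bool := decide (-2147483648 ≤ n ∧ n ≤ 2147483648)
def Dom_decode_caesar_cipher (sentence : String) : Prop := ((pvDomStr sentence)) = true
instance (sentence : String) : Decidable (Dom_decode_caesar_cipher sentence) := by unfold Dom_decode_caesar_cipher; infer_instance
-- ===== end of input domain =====

-- B replaces A's 25-shift re-decoding loops by one pass computing each 3-letter word's
-- required shift directly and taking the minimal (shift, index) pair (objective: faster).


-- ===== PORT A =====

-- one character of A's decode_word: shift back by `shift` if alphabetic, else keep
def pvDecChar (shift : Int) (c : Char) : Char :=
  if PySem.Chars.isalpha c then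
    let ascii_offset : Int := if PySem.Chars.islower c then 97 else 65
    Char.ofNat (PySem.Int.mod ((c.toNat : Int) - ascii_offset - shift) 26 + ascii_offset).toNat
  else c

-- A's decode_word: build the decoded word by appending character by character
def pvDecodeWord (word : String) (shift : Int) : String :=
  String.ofList (word.toList.foldl (fun acc c => acc ++ [pvDecChar shift c]) [])

-- A's inner loop: first index i with decode_word(word, shift).lower() == "the"
def pvFindA (shift : Int) : List (Int × String) → Option Int
  | [] => none
  | (i, w) :: rest =>
      if PySem.Str.lower (pvDecodeWord w shift) == "the" then some i else pvFindA shift rest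

-- A's outer loop over the shifts
def pvOuterA (words : List String) : List Int → Option Int
  | [] => none
  | s :: rest =>
      match pvFindA s (PySem.List.enumerate words 0) with
      | some i => some i
      | none => pvOuterA words rest

def decode_caesar_cipher (sentence : String) : Int :=
  (pvOuterA (PySem.Str.split₀ sentence) (PySem.List.pyRange 1 26 1)).getD (-1)

-- ===== PORT B =====

-- B's helper: the unique shift in 1..25 decoding this word to "the", if any
def pvCand (w : String) : Option Int :=
  match w.toList with
  | [c0, c1, c2] =>
      if PySem.Str.strIsalpha w then
        let s0 := PySem.Int.mod (((PySem.Chars.lowerChar c0).toNat : Int) - 116) 26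
        if s0 ≠ 0 ∧ PySem.Int.mod (((PySem.Chars.lowerChar c1).toNat : Int) - 104) 26 = s0
               ∧ PySem.Int.mod (((PySem.Chars.lowerChar c2).toNat : Int) - 101) 26 = s0
        then some s0 else none
      else none
  | _ => none

-- B's loop body: keep the lexicographically smallest (shift, index) seen so far
def pvStep (best : Option (Int × Int)) (iw : Int × String) : Option (Int × Int) :=
  match pvCand iw.2 with
  | none => best
  | some s =>
      match best with
      | none => some (s, iw.1)
      | some q => if s < q.1 then some (s, iw.1) else best

def decode_caesar_cipher_alt (sentence : String) : Int :=
  match (PySem.List.enumerate (PySem.Str.split₀ sentence) 0).foldl pvStep none with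
  | some q => q.2
  | none => -1

-- ===== PRECONDITION & SPEC =====
def Spec_decode_caesar_cipher (sentence : String) (out : Int) : Prop := out = decode_caesar_cipher_alt sentence
instance (sentence : String) (out : Int) : Decidable (Spec_decode_caesar_cipher sentence out) := by unfold Spec_decode_caesar_cipher; infer_instance

-- ===== CLAIM (what is proved, stated in full; the proofs are below) =====
def Claim_equal_decode_caesar_cipher : Prop := ∀ (sentence : String), Dom_decode_caesar_cipher sentence → Spec_decode_caesar_cipher sentence (decode_caesar_cipher sentence)

-- ===== LEMMAS AND PROOFS =====

-- the candidate list: for each word (in index order) its shift, if it has one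
def pvL (l : List (Int × String)) : List (Int × Int) :=
  l.filterMap (fun iw => (pvCand iw.2).map (fun s => (s, iw.1)))

-- pvStep specialised to already-computed candidates
def pvStep2 (best : Option (Int × Int)) (p : Int × Int) : Option (Int × Int) :=
  match best with
  | none => some p
  | some q => if p.1 < q.1 then some p else best

theorem pvCharEqIff (a b : Char) : a = b ↔ a.toNat = b.toNat :=
  ⟨fun h => h ▸ rfl, fun h => Char.ext (UInt32.toNat_inj.mp h)⟩

theorem pvStrEqIff (x y : String) : x = y ↔ x.toList = y.toList :=
  ⟨fun h => h ▸ rfl, fun h => String.toList_inj.mp h⟩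

theorem pvToNat_ofNat (n : Nat) (h : n < 55296) : (Char.ofNat n).toNat = n := by
  rw [Char.toNat_ofNat, if_pos (Or.inl h)]

theorem pvIslower_iff (c : Char) : PySem.Chars.islower c = true ↔ 97 ≤ c.toNat ∧ c.toNat ≤ 122 := by
  rw [PySem.Chars.islower]
  simp only [Bool.and_eq_true, decide_eq_true_eq, Char.le_def, UInt32.le_iff_toNat_le,
    Char.toNat_val]
  rw [show ('a').toNat = 97 from rfl, show ('z').toNat = 122 from rfl]

theorem pvIsupper_iff (c : Char) : PySem.Chars.isupper c = true ↔ 65 ≤ c.toNat ∧ c.toNat ≤ 90 := by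
  rw [PySem.Chars.isupper]
  simp only [Bool.and_eq_true, decide_eq_true_eq, Char.le_def, UInt32.le_iff_toNat_le,
    Char.toNat_val]
  rw [show ('A').toNat = 65 from rfl, show ('Z').toNat = 90 from rfl]

theorem pvIsalpha_iff (c : Char) :
    PySem.Chars.isalpha c = true ↔
      (65 ≤ c.toNat ∧ c.toNat ≤ 90) ∨ (97 ≤ c.toNat ∧ c.toNat ≤ 122) := by
  rw [PySem.Chars.isalpha]
  simp only [Bool.or_eq_true, pvIsupper_iff, pvIslower_iff]

theorem pvLowerChar_toNat (c : Char) :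
    (PySem.Chars.lowerChar c).toNat =
      if 65 ≤ c.toNat ∧ c.toNat ≤ 90 then c.toNat + 32 else c.toNat := by
  rw [PySem.Chars.lowerChar]
  by_cases hu : PySem.Chars.isupper c = true
  · have hb := (pvIsupper_iff c).mp hu
    rw [if_pos hu, pvToNat_ofNat _ (by omega), if_pos hb]
  · rw [if_neg hu, if_neg (fun h => hu ((pvIsupper_iff c).mpr h))]

-- character-level bridge between A's decoding and B's modular test
theorem pvPerChar (c : Char) (s : Int) (h1 : 1 ≤ s) (h2 : s < 26) (T : Nat)
    (hT1 : 97 ≤ T) (hT2 : T ≤ 122) (t : Char) (ht : t.toNat = T) :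
    (PySem.Chars.lowerChar (pvDecChar s c) = t ↔
      (PySem.Chars.isalpha c = true ∧
        PySem.Int.mod (((PySem.Chars.lowerChar c).toNat : Int) - (T : Int)) 26 = s)) := by
  have h26 : (0 : Int) < 26 := by omega
  rw [pvCharEqIff, ht]
  by_cases hA : PySem.Chars.isalpha c = true
  · have hn := (pvIsalpha_iff c).mp hA
    rw [PySem.Int.mod_eq_emod_of_pos h26]
    by_cases hl : PySem.Chars.islower c = true
    · have hn2 := (pvIslower_iff c).mp hl
      simp only [pvDecChar, hA, hl, if_pos]
      rw [PySem.Int.mod_eq_emod_of_pos h26]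
      rw [pvLowerChar_toNat, pvToNat_ofNat _ (by omega), pvLowerChar_toNat c,
        if_neg (by omega)]
      simp only [true_and]
      split_ifs <;> omega
    · have hn2 : 65 ≤ c.toNat ∧ c.toNat ≤ 90 := by
        rcases hn with h | h
        · exact h
        · exact absurd ((pvIslower_iff c).mpr h) hl
      simp only [pvDecChar, hA, hl, if_pos, Bool.false_eq_true, if_false]
      rw [PySem.Int.mod_eq_emod_of_pos h26]
      rw [pvLowerChar_toNat, pvToNat_ofNat _ (by omega), pvLowerChar_toNat c,
        if_pos hn2]
      simp only [true_and]
      split_ifs <;> omega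
  · have hn : ¬ ((65 ≤ c.toNat ∧ c.toNat ≤ 90) ∨ (97 ≤ c.toNat ∧ c.toNat ≤ 122)) :=
      fun h => hA ((pvIsalpha_iff c).mpr h)
    simp only [pvDecChar, hA, Bool.false_eq_true, if_false]
    rw [pvLowerChar_toNat, if_neg (by omega)]
    simp only [false_and, iff_false]
    omega

theorem pvL_cons_none (j : Int) (w : String) (t : List (Int × String)) (h : pvCand w = none) :
    pvL ((j, w) :: t) = pvL t := by
  simp [pvL, h]

theorem pvL_cons_some (j : Int) (w : String) (t : List (Int × String)) (s : Int)
    (h : pvCand w = some s) : pvL ((j, w) :: t) = (s, j) :: pvL t := by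
  simp [pvL, h]

-- bounds of a candidate shift
theorem pvCand_bounds (w : String) (s : Int) (h : pvCand w = some s) : 1 ≤ s ∧ s < 26 := by
  have h26 : (0 : Int) < 26 := by omega
  unfold pvCand at h
  rcases hw : w.toList with _ | ⟨c0, _ | ⟨c1, _ | ⟨c2, _ | ⟨c3, l3⟩⟩⟩⟩ <;> rw [hw] at h
  · simp at h
  · simp at h
  · simp at h
  · dsimp only at h
    split_ifs at h with hA hcond
    · rw [Option.some.injEq] at h
      obtain ⟨hne, -, -⟩ := hcond
      rw [PySem.Int.mod_eq_emod_of_pos h26] at h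
      rw [PySem.Int.mod_eq_emod_of_pos h26] at hne
      omega
  · simp at h

-- word-level bridge: A's test succeeds at shift s iff s is B's candidate shift
theorem pvWord (w : String) (s : Int) (h1 : 1 ≤ s) (h2 : s < 26) :
    ((PySem.Str.lower (pvDecodeWord w s) == "the") = true) ↔ pvCand w = some s := by
  have key : (PySem.Str.lower (pvDecodeWord w s)).toList
      = w.toList.map (fun c => PySem.Chars.lowerChar (pvDecChar s c)) := by
    simp only [pvDecodeWord, PySem.Str.lower, String.toList_ofList,
      PySem.List.foldl_append_singleton_eq_map, List.nil_append, PySem.Chars.lower,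
      List.map_map]
    rfl
  rw [beq_iff_eq, pvStrEqIff, key, show ("the" : String).toList = ['t', 'h', 'e'] from rfl]
  unfold pvCand
  rcases hw : w.toList with _ | ⟨c0, _ | ⟨c1, _ | ⟨c2, _ | ⟨c3, l3⟩⟩⟩⟩
  · simp
  · simp
  · simp
  · -- exactly three characters
    have hsi : PySem.Str.strIsalpha w =
        (PySem.Chars.isalpha c0 && (PySem.Chars.isalpha c1 && PySem.Chars.isalpha c2)) := by
      rw [show PySem.Str.strIsalpha w = PySem.Chars.strIsalpha w.toList from rfl, hw,
        PySem.Chars.strIsalpha]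
      simp [List.all_cons]
    dsimp only
    simp only [List.map_cons, List.map_nil, List.cons.injEq, and_true]
    rw [pvPerChar c0 s h1 h2 116 (by omega) (by omega) 't' rfl,
      pvPerChar c1 s h1 h2 104 (by omega) (by omega) 'h' rfl,
      pvPerChar c2 s h1 h2 101 (by omega) (by omega) 'e' rfl, hsi]
    push_cast
    by_cases hA0 : PySem.Chars.isalpha c0 = true
    case neg => simp [hA0]
    by_cases hA1 : PySem.Chars.isalpha c1 = true
    case neg => simp [hA0, hA1]
    by_cases hA2 : PySem.Chars.isalpha c2 = true
    case neg => simp [hA0, hA1, hA2]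
    simp only [hA0, hA1, hA2, true_and, Bool.and_self, if_true]
    constructor
    · rintro ⟨hc0, hc1, hc2⟩
      rw [if_pos ⟨by omega, by omega, by omega⟩]
      rw [hc0]
    · intro h
      split_ifs at h with hcond
      rw [Option.some.injEq] at h
      obtain ⟨-, hb, hc⟩ := hcond
      omega
  · simp

theorem pvFindA_none (s : Int) (h1 : 1 ≤ s) (h2 : s < 26) (l : List (Int × String))
    (h : pvFindA s l = none) : ∀ q ∈ pvL l, q.1 ≠ s := by
  induction l with
  | nil => simp [pvL]
  | cons head tail ih =>
    obtain ⟨j, w⟩ := head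
    rw [pvFindA] at h
    split_ifs at h with hc
    have hcand : pvCand w ≠ some s := fun hs => hc ((pvWord w s h1 h2).mpr hs)
    intro q hq
    rcases hcw : pvCand w with - | s'
    · rw [pvL_cons_none j w tail hcw] at hq
      exact ih h q hq
    · rw [pvL_cons_some j w tail s' hcw] at hq
      rcases List.mem_cons.mp hq with rfl | hq
      · intro hqe
        exact hcand (by rw [hcw]; exact congrArg some hqe)
      · exact ih h q hq

theorem pvFindA_some (s : Int) (h1 : 1 ≤ s) (h2 : s < 26) (l : List (Int × String)) (i : Int)
    (h : pvFindA s l = some i) :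
    ∃ M1 M2, pvL l = M1 ++ (s, i) :: M2 ∧ ∀ q ∈ M1, q.1 ≠ s := by
  induction l generalizing i with
  | nil => simp [pvFindA] at h
  | cons head tail ih =>
    obtain ⟨j, w⟩ := head
    rw [pvFindA] at h
    split_ifs at h with hc
    · rw [Option.some.injEq] at h
      subst h
      have hcand : pvCand w = some s := (pvWord w s h1 h2).mp hc
      exact ⟨[], pvL tail, by rw [pvL_cons_some j w tail s hcand]; rfl, by simp⟩
    · obtain ⟨M1, M2, hEq, hM1⟩ := ih i h
      have hcand : pvCand w ≠ some s := fun hs => hc ((pvWord w s h1 h2).mpr hs)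
      rcases hcw : pvCand w with - | s'
      · exact ⟨M1, M2, by rw [pvL_cons_none j w tail hcw]; exact hEq, hM1⟩
      · refine ⟨(s', j) :: M1, M2, ?_, ?_⟩
        · rw [pvL_cons_some j w tail s' hcw, hEq]
          rfl
        · intro q hq
          rcases List.mem_cons.mp hq with rfl | hq
          · intro hqe
            exact hcand (by rw [hcw]; exact congrArg some hqe)
          · exact hM1 q hq

-- invariant for the pvStep2 fold: accumulator stays none or strictly above p
theorem pvFold_inv (p : Int × Int) (M : List (Int × Int)) :
    ∀ acc, (∀ q ∈ M, p.1 < q.1) → (acc = none ∨ ∃ q, acc = some q ∧ p.1 < q.1) →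
      (M.foldl pvStep2 acc = none ∨ ∃ q, M.foldl pvStep2 acc = some q ∧ p.1 < q.1) := by
  induction M with
  | nil => intro acc _ hacc; simpa using hacc
  | cons x xs ih =>
    intro acc hM hacc
    have hx : p.1 < x.1 := hM x (by simp)
    rw [List.foldl_cons]
    apply ih _ (fun q hq => hM q (by simp [hq]))
    rcases hacc with rfl | ⟨q, rfl, hq⟩
    · exact Or.inr ⟨x, rfl, hx⟩
    · simp only [pvStep2]
      split_ifs
      · exact Or.inr ⟨x, rfl, hx⟩
      · exact Or.inr ⟨q, rfl, hq⟩

-- folding pvStep2 over elements never smaller than p keeps p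
theorem pvFold_keep (M : List (Int × Int)) (p : Int × Int) (h : ∀ q ∈ M, ¬ q.1 < p.1) :
    M.foldl pvStep2 (some p) = some p := by
  induction M with
  | nil => rfl
  | cons x xs ih =>
    rw [List.foldl_cons]
    rw [show pvStep2 (some p) x = some p by simp only [pvStep2]; rw [if_neg (h x (by simp))]]
    exact ih (fun q hq => h q (by simp [hq]))

-- folding pvStep2 from none over elements all larger than p, then over M2, gives p
theorem pvFold_min (M1 M2 : List (Int × Int)) (p : Int × Int)
    (hM1 : ∀ q ∈ M1, p.1 < q.1) (hM2 : ∀ q ∈ M2, ¬ q.1 < p.1) :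
    (M1 ++ p :: M2).foldl pvStep2 none = some p := by
  rw [List.foldl_append, List.foldl_cons]
  have hmid : pvStep2 (M1.foldl pvStep2 none) p = some p := by
    rcases pvFold_inv p M1 none hM1 (Or.inl rfl) with h | ⟨q, hq, hlt⟩
    · rw [h]; rfl
    · rw [hq]
      simp only [pvStep2]
      rw [if_pos hlt]
  rw [hmid]
  exact pvFold_keep M2 p hM2

-- B's fold over words is the pvStep2 fold over the candidate list
theorem pvB_fold (l : List (Int × String)) (acc : Option (Int × Int)) :
    l.foldl pvStep acc = (pvL l).foldl pvStep2 acc := by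
  induction l generalizing acc with
  | nil => rfl
  | cons head tail ih =>
    obtain ⟨j, w⟩ := head
    rcases hcw : pvCand w with - | s
    · rw [List.foldl_cons, pvL_cons_none j w tail hcw,
        show pvStep acc (j, w) = acc by simp [pvStep, hcw]]
      exact ih acc
    · rw [List.foldl_cons, pvL_cons_some j w tail s hcw, List.foldl_cons,
        show pvStep acc (j, w) = pvStep2 acc (s, j) by simp [pvStep, pvStep2, hcw]]
      exact ih _

theorem pvL_mem_bounds (l : List (Int × String)) (q : Int × Int) (h : q ∈ pvL l) :
    1 ≤ q.1 ∧ q.1 < 26 := by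
  rw [pvL, List.mem_filterMap] at h
  obtain ⟨iw, -, hiw⟩ := h
  rcases hc : pvCand iw.2 with - | s
  · rw [hc] at hiw; simp at hiw
  · rw [hc] at hiw
    simp only [Option.map_some, Option.some.injEq] at hiw
    have := pvCand_bounds iw.2 s hc
    rw [← hiw]
    exact this

-- A's outer loop from shift a computes the minimum over candidates with shift ≥ a
theorem pvA_outer (words : List String) (k : Nat) (a : Int) (ha : 1 ≤ a) (hk : a + k = 26) :
    pvOuterA words (PySem.List.pyRange a 26 1) =
      (((pvL (PySem.List.enumerate words 0)).filter (fun q => decide (a ≤ q.1))).foldl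
        pvStep2 none).map (fun q => q.2) := by
  induction k generalizing a with
  | zero =>
    rw [PySem.List.pyRange_one_eq_nil (by omega)]
    have hfilter : (pvL (PySem.List.enumerate words 0)).filter (fun q => decide (a ≤ q.1)) = [] := by
      rw [List.filter_eq_nil_iff]
      intro q hq
      have := pvL_mem_bounds _ q hq
      simp only [decide_eq_true_eq]
      omega
    rw [hfilter]
    rfl
  | succ k ih =>
    rw [PySem.List.pyRange_one_cons (by omega)]
    rcases hf : pvFindA a (PySem.List.enumerate words 0) with - | i
    · rw [show pvOuterA words (a :: PySem.List.pyRange (a + 1) 26 1)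
          = pvOuterA words (PySem.List.pyRange (a + 1) 26 1) by simp only [pvOuterA, hf]]
      rw [ih (a + 1) (by omega) (by omega)]
      have hcg : (pvL (PySem.List.enumerate words 0)).filter (fun q => decide (a ≤ q.1))
          = (pvL (PySem.List.enumerate words 0)).filter (fun q => decide (a + 1 ≤ q.1)) := by
        apply List.filter_congr
        intro q hq
        have hb := pvL_mem_bounds _ q hq
        have hne := pvFindA_none a ha (by omega) _ hf q hq
        simp only [decide_eq_decide]
        omega
      rw [hcg]
    · rw [show pvOuterA words (a :: PySem.List.pyRange (a + 1) 26 1)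
          = some i by simp only [pvOuterA, hf]]
      obtain ⟨M1, M2, hEq, hM1⟩ := pvFindA_some a ha (by omega) _ i hf
      rw [hEq, List.filter_append, List.filter_cons]
      rw [if_pos (by simp)]
      rw [pvFold_min]
      · rfl
      · intro q hq
        have hmem := List.mem_of_mem_filter hq
        have hge := List.of_mem_filter hq
        simp only [decide_eq_true_eq] at hge
        have hne := hM1 q hmem
        simpa using lt_of_le_of_ne hge (Ne.symm hne)
      · intro q hq
        have hge := List.of_mem_filter hq
        simp only [decide_eq_true_eq] at hge
        simp only [not_lt]
        exact hge

-- ===== VERDICT (by name: the statement is the Claim_ definition above) =====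
theorem decode_caesar_cipher_spec : Claim_equal_decode_caesar_cipher := by
  intro sentence _
  unfold Spec_decode_caesar_cipher decode_caesar_cipher decode_caesar_cipher_alt
  rw [pvA_outer (PySem.Str.split₀ sentence) 25 1 (by omega) (by omega)]
  have hfilt : (pvL (PySem.List.enumerate (PySem.Str.split₀ sentence) 0)).filter
      (fun q => decide ((1 : Int) ≤ q.1)) = pvL (PySem.List.enumerate (PySem.Str.split₀ sentence) 0) := by
    apply List.filter_eq_self.mpr
    intro q hq
    have := pvL_mem_bounds _ q hq
    simp only [decide_eq_true_eq]
    omega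
  rw [hfilt, pvB_fold]
  cases h : (pvL (PySem.List.enumerate (PySem.Str.split₀ sentence) 0)).foldl pvStep2 none with
  | none => rfl
  | some q => rfl
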